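-- pv_equiv track=rewrite | github.com/mariamzhamakochyan/Code-Crack | main.py | cube_builder
-- ===== SOURCE A (Python) =====
-- def cube_builder(code_text):
--     code_text = code_text.replace(" ", "0")
--     if len(code_text) % 8 == 0:
--         row = len(code_text) // 8
--     else:
--         row = len(code_text) // 8 + 1
--     cube_matrix = [['0'] * 8 for _ in range(row)]
--     for i, char in enumerate(code_text):
--         cube_matrix[i // 8][i % 8] = char.lower()
--     return cube_matrix
-- ===== SOURCE B (Python) =====
-- def cube_builder(code_text):
--     s = code_text.replace(" ", "0").lower()
--     return [list(s[i:i + 8].ljust(8, "0")) for i in range(0, len(s), 8)]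
-- ===== Notes on version B (the rewrite author's own statement) =====
-- stated objective: simpler
-- what changed: Instead of pre-allocating a zero-filled matrix and overwriting cells one character at a time by computed row/column indices, B lowercases the whole string once and slices it into 8-character rows, right-padding the final slice with the fill character via ljust.
import Mathlib
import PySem

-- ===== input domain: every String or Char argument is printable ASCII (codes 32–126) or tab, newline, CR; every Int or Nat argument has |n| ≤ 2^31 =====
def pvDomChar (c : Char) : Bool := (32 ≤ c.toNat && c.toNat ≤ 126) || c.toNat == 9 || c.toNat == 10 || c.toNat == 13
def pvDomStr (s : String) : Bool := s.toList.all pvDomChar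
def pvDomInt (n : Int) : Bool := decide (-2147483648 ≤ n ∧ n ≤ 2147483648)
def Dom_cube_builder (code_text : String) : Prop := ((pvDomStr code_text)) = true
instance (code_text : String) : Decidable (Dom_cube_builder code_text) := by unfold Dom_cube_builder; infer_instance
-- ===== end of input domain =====

-- B replaces A's pre-filled matrix with index-computed cell writes by slicing the lowered string into 8-char rows padded via ljust (objective: simpler; a timing run measured B faster by a constant factor).

-- ===== PORT A =====
-- one write of A's loop body: cube_matrix[i // 8][i % 8] = char.lower()
def pvWrite (m : List (List String)) (p : Char × Nat) : List (List String) :=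
  m.modify (p.2 / 8) (fun r => r.set (p.2 % 8) (PySem.Str.lower (String.ofList [p.1])))

def cube_builder (code_text : String) : List (List String) :=
  let cs := (PySem.Str.replace code_text " " "0").toList
  let n := cs.length
  let row := if n % 8 == 0 then n / 8 else n / 8 + 1
  let init : List (List String) := List.replicate row (List.replicate 8 "0")
  (cs.zipIdx).foldl pvWrite init   -- for i, char in enumerate(code_text): indices are 0,1,2,…

-- ===== PORT B =====
-- list(chunk.ljust(8, "0")) for an ≤8-char chunk
def pvRow (cs : List Char) : List String :=
  (cs ++ List.replicate (8 - cs.length) '0').map (fun c => String.ofList [c])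

-- [list(s[i:i+8].ljust(8,"0")) for i in range(0, len(s), 8)]
def pvChunks (cs : List Char) : List (List String) :=
  if h : cs = [] then []
  else pvRow (cs.take 8) :: pvChunks (cs.drop 8)
termination_by cs.length
decreasing_by
  have := List.length_pos_of_ne_nil h
  simp only [List.length_drop]
  omega

def cube_builder_alt (code_text : String) : List (List String) :=
  pvChunks (PySem.Str.lower (PySem.Str.replace code_text " " "0")).toList

-- ===== PRECONDITION & SPEC =====
def Spec_cube_builder (code_text : String) (out : List (List String)) : Prop := out = cube_builder_alt code_text
instance (code_text : String) (out : List (List String)) : Decidable (Spec_cube_builder code_text out) := by unfold Spec_cube_builder; infer_instance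

-- ===== CLAIM (what is proved, stated in full; the proofs are below) =====
def Claim_equal_cube_builder : Prop := ∀ (code_text : String), Dom_cube_builder code_text → Spec_cube_builder code_text (cube_builder code_text)

-- ===== LEMMAS AND PROOFS =====

def pvLow (c : Char) : String := PySem.Str.lower (String.ofList [c])

theorem pvLow_eq (c : Char) : pvLow c = String.ofList [PySem.Chars.lowerChar c] := by
  have h := PySem.Str.toList_lower (String.ofList [c])
  apply String.toList_injective
  simpa [pvLow, PySem.Chars.lower] using h

theorem pvChunks_nil : pvChunks [] = [] := by rw [pvChunks]; simp

theorem pvChunks_cons (cs : List Char) (h : cs ≠ []) :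
    pvChunks cs = pvRow (cs.take 8) :: pvChunks (cs.drop 8) := by
  rw [pvChunks]; simp [h]

theorem pv_set_boundary (pre : List String) (rest : List String) (x y : String) :
    (pre ++ y :: rest).set pre.length x = pre ++ x :: rest := by
  induction pre with
  | nil => simp
  | cons a pre ih => simpa using ih

-- writes at indices ≥ 8 leave the first row alone and act, shifted by one row, on the tail
theorem pv_shift (cs : List Char) : ∀ (i0 : Nat) (r : List String) (m : List (List String)),
    (cs.zipIdx (8 + i0)).foldl pvWrite (r :: m) = r :: (cs.zipIdx i0).foldl pvWrite m := by
  induction cs with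
  | nil => intro i0 r m; simp
  | cons c cs ih =>
    intro i0 r m
    rw [List.zipIdx_cons, List.zipIdx_cons, List.foldl_cons, List.foldl_cons]
    have h1 : pvWrite (r :: m) (c, 8 + i0) = r :: pvWrite m (c, i0) := by
      simp only [pvWrite, List.modify_cons]
      have hd : (8 + i0) / 8 = (i0 / 8) + 1 := by omega
      have hm : (8 + i0) % 8 = i0 % 8 := by omega
      simp [hd, hm]
    rw [h1]
    have h2 : 8 + i0 + 1 = 8 + (i0 + 1) := by omega
    rw [h2, ih]

-- filling the first row: writes at indices pre.length, pre.length+1, … (all < 8) rewrite the '0'-row left to right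
theorem pv_fill (cs : List Char) : ∀ (pre : List String) (m : List (List String)),
    pre.length + cs.length ≤ 8 →
    (cs.zipIdx pre.length).foldl pvWrite ((pre ++ List.replicate (8 - pre.length) "0") :: m)
      = (pre ++ cs.map pvLow ++ List.replicate (8 - pre.length - cs.length) "0") :: m := by
  induction cs with
  | nil => intro pre m h; simp
  | cons c cs ih =>
    intro pre m h
    rw [List.zipIdx_cons, List.foldl_cons]
    have hj : pre.length < 8 := by simp at h; omega
    have hrep : List.replicate (8 - pre.length) ("0" : String)
        = "0" :: List.replicate (8 - (pre.length + 1)) "0" := by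
      rw [← List.replicate_succ]
      congr 1
      omega
    have hw : pvWrite ((pre ++ List.replicate (8 - pre.length) "0") :: m) (c, pre.length)
        = ((pre ++ [pvLow c]) ++ List.replicate (8 - (pre.length + 1)) "0") :: m := by
      simp only [pvWrite, List.modify_cons]
      have hd : pre.length / 8 = 0 := by omega
      have hm : pre.length % 8 = pre.length := by omega
      rw [hd, hm, if_pos rfl, hrep, pv_set_boundary]
      simp [pvLow]
    rw [hw]
    have hlen : (pre ++ [pvLow c]).length = pre.length + 1 := by simp
    have hih := ih (pre ++ [pvLow c]) m (by simp at h ⊢; omega)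
    rw [hlen] at hih
    rw [hih]
    have heq : 8 - (pre.length + 1) - cs.length = 8 - pre.length - (c :: cs).length := by
      simp; omega
    rw [heq]
    simp

-- the number of rows A allocates
def pvRows (n : Nat) : Nat := if n % 8 == 0 then n / 8 else n / 8 + 1

theorem pv_key : ∀ (n : Nat) (cs : List Char), cs.length ≤ n →
    (cs.zipIdx).foldl pvWrite (List.replicate (pvRows cs.length) (List.replicate 8 "0"))
      = pvChunks (cs.map PySem.Chars.lowerChar) := by
  intro n
  induction n with
  | zero =>
    intro cs h
    have hnil : cs = [] := List.eq_nil_of_length_eq_zero (by omega)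
    subst hnil
    simp [pvRows, pvChunks_nil]
  | succ n ih =>
    intro cs h
    by_cases hcs : cs = []
    · subst hcs; simp [pvRows, pvChunks_nil]
    · have hlen : 1 ≤ cs.length := List.length_pos_of_ne_nil hcs
      have hrows : pvRows cs.length = (pvRows (cs.length - 8)) + 1 := by
        simp only [pvRows, beq_iff_eq]
        split_ifs <;> omega
      have hz : cs.zipIdx = (cs.take 8).zipIdx ++ ((cs.drop 8).zipIdx (0 + (cs.take 8).length)) := by
        conv_lhs => rw [(List.take_append_drop 8 cs).symm]
        rw [List.zipIdx_append]
      rw [hrows, List.replicate_succ, hz, List.foldl_append]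
      have hfill := pv_fill (cs.take 8) ([]) (List.replicate (pvRows (cs.length - 8)) (List.replicate 8 "0")) (by simp)
      simp only [List.length_nil, List.nil_append, Nat.sub_zero] at hfill
      rw [hfill]
      have hdroplen : (cs.drop 8).length = cs.length - 8 := by simp
      rw [pvChunks_cons _ (by simpa using hcs)]
      have hroweq : (cs.take 8).map pvLow ++ List.replicate (8 - (cs.take 8).length) "0"
          = pvRow ((cs.map PySem.Chars.lowerChar).take 8) := by
        simp only [pvRow, ← List.map_take, List.map_map, List.map_append, List.map_replicate]
        congr 1
        · apply List.map_congr_left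
          intro a _
          simp [Function.comp, pvLow_eq]
        · simp
      by_cases h8 : cs.length ≤ 8
      · have hdnil : cs.drop 8 = [] := by
          apply List.eq_nil_of_length_eq_zero; omega
        have hrzero : pvRows (cs.length - 8) = 0 := by
          have h0 : cs.length - 8 = 0 := by omega
          simp [pvRows, h0]
        rw [hdnil, hrzero]
        simp only [List.replicate_zero, List.zipIdx_nil, List.foldl_nil]
        rw [← List.map_drop, hdnil]
        simp only [List.map_nil, pvChunks_nil]
        rw [hroweq]
      · have htlen : (cs.take 8).length = 8 := by simp; omega
        rw [htlen] at hroweq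
        have hsh := pv_shift (cs.drop 8) 0 ((cs.take 8).map pvLow ++ List.replicate (8 - (cs.take 8).length) "0")
          (List.replicate (pvRows (cs.length - 8)) (List.replicate 8 "0"))
        rw [htlen] at hz ⊢
        simp only [Nat.zero_add, Nat.add_zero, htlen] at hsh ⊢
        rw [hsh]
        have hih := ih (cs.drop 8) (by omega)
        rw [hdroplen] at hih
        rw [hih, ← List.map_drop]
        rw [hroweq]

-- ===== VERDICT (by name: the statement is the Claim_ definition above) =====
theorem cube_builder_spec : Claim_equal_cube_builder := by
  intro code_text _
  unfold Spec_cube_builder cube_builder cube_builder_alt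
  rw [PySem.Str.toList_lower]
  have hl : PySem.Chars.lower ((PySem.Str.replace code_text " " "0").toList)
      = ((PySem.Str.replace code_text " " "0").toList).map PySem.Chars.lowerChar := rfl
  rw [hl]
  exact pv_key _ _ (le_refl _)
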